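-- pv_equiv track=rewrite | github.com/matthew-clarke-williams/CodilityQuestions | 12_chocolates_by_numbers.py | solution
-- ===== SOURCE A (Python) =====
-- def solution(N, M):
--     chocs_eaten = set()
--     num_chocs_attempted = 0
--
--     cur_choc = 0   # The position of the current chocolate
--     # eat the first chocolate
--     chocs_eaten.add(cur_choc)
--     num_chocs_attempted += 1
--
--     while len(chocs_eaten) == num_chocs_attempted:
--         # move to next position
--         cur_choc = (cur_choc + M) % N
--
--         # Add the chocolate and see if the set size increases
--         chocs_eaten.add(cur_choc)
--         num_chocs_attempted += 1
--
--     return len(chocs_eaten)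
-- ===== SOURCE B (Python) =====
-- def solution(N, M):
--     # Closed form: the orbit of 0 under repeated +M modulo N has exactly
--     # |N| // gcd(|N|, |M|) distinct elements.  Euclidean algorithm, O(log min(N,M)).
--     a, b = abs(N), abs(M)
--     while b:
--         a, b = b, a % b
--     return abs(N) // a
-- ===== Notes on version B (the rewrite author's own statement) =====
-- stated objective: faster
-- what changed: Replaces A's step-by-step simulation of the eating cycle (a set of visited positions grown until a repeat) by the closed form |N| // gcd(|N|, |M|) computed with the Euclidean algorithm.
import Mathlib
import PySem

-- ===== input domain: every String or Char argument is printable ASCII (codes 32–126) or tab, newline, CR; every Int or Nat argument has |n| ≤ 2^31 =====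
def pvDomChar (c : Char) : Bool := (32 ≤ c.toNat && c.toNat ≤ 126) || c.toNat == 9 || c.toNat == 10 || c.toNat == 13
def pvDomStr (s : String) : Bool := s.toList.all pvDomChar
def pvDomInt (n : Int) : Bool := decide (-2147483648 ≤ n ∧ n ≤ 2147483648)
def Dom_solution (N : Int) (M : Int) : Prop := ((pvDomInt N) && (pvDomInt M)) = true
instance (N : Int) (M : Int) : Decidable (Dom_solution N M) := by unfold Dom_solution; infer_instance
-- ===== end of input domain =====

-- B replaces A's O(N/gcd) simulation of the eating cycle by the closed form
-- |N| // gcd(|N|,|M|) computed with the Euclidean algorithm (objective: faster).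

-- ===== PORT A =====
-- A's while-loop; fuel only makes the same computation total (the loop needs at
-- most |N| + 2 condition checks, the fuel-0 branch is never reached under Pre_).
-- A consumes its set only through len and membership (both order-independent),
-- so Python's hash set is ported as Std.HashSet (constant-time add/len, like
-- CPython's set); a list-backed set model would make this same loop quadratic.
def solutionLoop (N : Int) (M : Int) (fuel : Nat) (chocsEaten : Std.HashSet Int)
    (numAttempted : Int) (curChoc : Int) : Int :=
  match fuel with
  | 0 => (chocsEaten.size : Int)
  | fuel + 1 =>
    if (chocsEaten.size : Int) = numAttempted then
      let cur' := PySem.Int.mod (curChoc + M) N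
      solutionLoop N M fuel (chocsEaten.insert cur') (numAttempted + 1) cur'
    else (chocsEaten.size : Int)

def solution (N : Int) (M : Int) : Int :=
  solutionLoop N M (N.natAbs + 2) ((∅ : Std.HashSet Int).insert 0) 1 0

-- ===== PORT B =====
-- while b: a, b = b, a % b   (fuel only makes the same loop total: b strictly
-- decreases while nonnegative, so |M| + 1 condition checks always suffice)
def euclidLoop (fuel : Nat) (a : Int) (b : Int) : Int :=
  match fuel with
  | 0 => a
  | fuel + 1 => if b ≠ 0 then euclidLoop fuel b (PySem.Int.mod a b) else a

def solution_alt (N : Int) (M : Int) : Int :=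
  PySem.Int.floordiv |N| (euclidLoop (M.natAbs + 1) |N| |M|)

-- ===== PRECONDITION & SPEC =====
-- Pre_ excludes exactly N = 0, on which A raises ZeroDivisionError ('% N').
def Pre_solution (N : Int) (M : Int) : Prop := N ≠ 0
instance (N : Int) (M : Int) : Decidable (Pre_solution N M) := by unfold Pre_solution; infer_instance
def pvWitness_solution : Int × Int := (10, 4)

def Spec_solution (N : Int) (M : Int) (out : Int) : Prop := out = solution_alt N M
instance (N : Int) (M : Int) (out : Int) : Decidable (Spec_solution N M out) := by unfold Spec_solution; infer_instance

-- ===== CLAIM (what is proved, stated in full; the proofs are below) =====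
def Claim_equal_solution : Prop := ∀ (N : Int) (M : Int), Dom_solution N M → Pre_solution N M → Spec_solution N M (solution N M)

-- ===== LEMMAS AND PROOFS =====

-- the value visited after j steps of A's loop
def pvF (N : Int) (M : Int) (j : Nat) : Int := PySem.Int.mod ((j : Int) * M) N

-- the number of distinct positions in the orbit
def pvOrd (N : Int) (M : Int) : Nat := N.natAbs / Nat.gcd N.natAbs M.natAbs

theorem pvMod_congr (N x y : Int) (h : N ∣ (x - y)) :
    PySem.Int.mod x N = PySem.Int.mod y N := by
  obtain ⟨c, hc⟩ := h
  have hx : x = y + c * N := by linarith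
  simp only [PySem.Int.mod, hx]
  exact Int.add_mul_fmod_self_right y c N

theorem pvF_zero (N M : Int) : pvF N M 0 = 0 := by
  simp [pvF, PySem.Int.mod]

theorem pvF_step (N M : Int) (i : Nat) (hi : 1 ≤ i) :
    PySem.Int.mod (pvF N M (i - 1) + M) N = pvF N M i := by
  apply pvMod_congr
  refine ⟨-(PySem.Int.floordiv (((i - 1 : Nat) : Int) * M) N), ?_⟩
  have hdm := PySem.Int.floordiv_mul_add_mod (((i - 1 : Nat) : Int) * M) N
  have hcast : ((i - 1 : Nat) : Int) = (i : Int) - 1 := by omega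
  unfold pvF
  rw [hcast] at hdm ⊢
  linear_combination hdm

theorem pvF_inj (N M : Int) (hN : N ≠ 0) (j k : Nat) (hjk : j < k)
    (hk : k < pvOrd N M) : pvF N M j ≠ pvF N M k := by
  intro heq
  have hn0 : 0 < N.natAbs := Int.natAbs_pos.mpr hN
  have hg0 : 0 < Nat.gcd N.natAbs M.natAbs := Nat.gcd_pos_of_pos_left _ hn0
  -- from equal mods: N ∣ (k - j) * M
  have hdvd : N ∣ ((k : Int) - (j : Int)) * M := by
    have hj := PySem.Int.floordiv_mul_add_mod ((j : Int) * M) N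
    have hk' := PySem.Int.floordiv_mul_add_mod ((k : Int) * M) N
    unfold pvF at heq
    refine ⟨PySem.Int.floordiv ((k : Int) * M) N - PySem.Int.floordiv ((j : Int) * M) N, ?_⟩
    linear_combination hj - hk' - heq
  -- pass to natAbs
  have hdvd' : N.natAbs ∣ (k - j) * M.natAbs := by
    have := Int.natAbs_dvd_natAbs.mpr hdvd
    rwa [Int.natAbs_mul, show ((k : Int) - (j : Int)).natAbs = k - j by omega] at this
  have h1 := Nat.div_mul_cancel (Nat.gcd_dvd_left N.natAbs M.natAbs)
  have h2 := Nat.div_mul_cancel (Nat.gcd_dvd_right N.natAbs M.natAbs)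
  have hdvd'' : (N.natAbs / Nat.gcd N.natAbs M.natAbs) ∣
      (k - j) * (M.natAbs / Nat.gcd N.natAbs M.natAbs) := by
    refine (Nat.mul_dvd_mul_iff_right hg0).mp ?_
    have key : (k - j) * (M.natAbs / Nat.gcd N.natAbs M.natAbs) * Nat.gcd N.natAbs M.natAbs
        = (k - j) * M.natAbs := by
      calc (k - j) * (M.natAbs / Nat.gcd N.natAbs M.natAbs) * Nat.gcd N.natAbs M.natAbs
          = (k - j) * ((M.natAbs / Nat.gcd N.natAbs M.natAbs) * Nat.gcd N.natAbs M.natAbs) := by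
            ring
        _ = (k - j) * M.natAbs := by rw [h2]
    rw [h1, key]
    exact hdvd'
  have hco : (N.natAbs / Nat.gcd N.natAbs M.natAbs).Coprime
      (M.natAbs / Nat.gcd N.natAbs M.natAbs) := Nat.coprime_div_gcd_div_gcd hg0
  have hdd := hco.dvd_of_dvd_mul_right hdvd''
  have hle : N.natAbs / Nat.gcd N.natAbs M.natAbs ≤ k - j := Nat.le_of_dvd (by omega) hdd
  have hkord : k < N.natAbs / Nat.gcd N.natAbs M.natAbs := hk
  omega

theorem pvF_ord (N M : Int) (hN : N ≠ 0) : pvF N M (pvOrd N M) = 0 := by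
  rw [← pvF_zero N M]
  apply pvMod_congr
  simp only [Nat.cast_zero, zero_mul, sub_zero]
  rw [← Int.natAbs_dvd_natAbs, Int.natAbs_mul, Int.natAbs_natCast]
  have hn0 : 0 < N.natAbs := Int.natAbs_pos.mpr hN
  have h1 := Nat.div_mul_cancel (Nat.gcd_dvd_left N.natAbs M.natAbs)
  have h2 := Nat.div_mul_cancel (Nat.gcd_dvd_right N.natAbs M.natAbs)
  refine ⟨M.natAbs / Nat.gcd N.natAbs M.natAbs, ?_⟩
  unfold pvOrd
  calc (N.natAbs / Nat.gcd N.natAbs M.natAbs) * M.natAbs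
      = (N.natAbs / Nat.gcd N.natAbs M.natAbs) *
        ((M.natAbs / Nat.gcd N.natAbs M.natAbs) * Nat.gcd N.natAbs M.natAbs) := by rw [h2]
    _ = ((N.natAbs / Nat.gcd N.natAbs M.natAbs) * Nat.gcd N.natAbs M.natAbs) *
        (M.natAbs / Nat.gcd N.natAbs M.natAbs) := by ring
    _ = N.natAbs * (M.natAbs / Nat.gcd N.natAbs M.natAbs) := by rw [h1]

theorem pvOrd_pos (N M : Int) (hN : N ≠ 0) : 1 ≤ pvOrd N M := by
  have hn0 : 0 < N.natAbs := Int.natAbs_pos.mpr hN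
  have hg0 : 0 < Nat.gcd N.natAbs M.natAbs := Nat.gcd_pos_of_pos_left _ hn0
  have hle : Nat.gcd N.natAbs M.natAbs ≤ N.natAbs :=
    Nat.le_of_dvd hn0 (Nat.gcd_dvd_left _ _)
  exact (Nat.one_le_div_iff hg0).mpr hle

theorem pvOrd_le (N M : Int) : pvOrd N M ≤ N.natAbs := Nat.div_le_self _ _

theorem pvLoop_key (N M : Int) (hN : N ≠ 0) :
    ∀ (fuel i : Nat) (s : Std.HashSet Int), 1 ≤ i → i ≤ pvOrd N M →
      pvOrd N M + 1 - i < fuel → s.size = i →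
      (∀ x, x ∈ s ↔ ∃ j, j < i ∧ pvF N M j = x) →
      solutionLoop N M fuel s (i : Int) (pvF N M (i - 1)) = (pvOrd N M : Int) := by
  intro fuel
  induction fuel with
  | zero => intro i s h1 h2 hf hsize hmem; omega
  | succ f ih =>
    intro i s h1 h2 hf hsize hmem
    rw [solutionLoop, if_pos (by rw [hsize])]
    simp only [pvF_step N M i h1]
    by_cases hi : i < pvOrd N M
    · have hnotmem : pvF N M i ∉ s := by
        rw [hmem]
        rintro ⟨j, hj, hje⟩
        exact pvF_inj N M hN j i hj hi hje
      have hsize' : (s.insert (pvF N M i)).size = i + 1 := by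
        rw [Std.HashSet.size_insert, if_neg hnotmem, hsize]
      have hmem' : ∀ x, x ∈ s.insert (pvF N M i) ↔ ∃ j, j < i + 1 ∧ pvF N M j = x := by
        intro x
        rw [Std.HashSet.mem_insert, beq_iff_eq, hmem]
        constructor
        · rintro (rfl | ⟨j, hj, hje⟩)
          · exact ⟨i, by omega, rfl⟩
          · exact ⟨j, by omega, hje⟩
        · rintro ⟨j, hj, hje⟩
          rcases Nat.lt_succ_iff_lt_or_eq.mp hj with hj' | rfl
          · exact Or.inr ⟨j, hj', hje⟩
          · exact Or.inl hje

      have hcast : (i : Int) + 1 = ((i + 1 : Nat) : Int) := by push_cast; ring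
      rw [hcast]
      have := ih (i + 1) (s.insert (pvF N M i)) (by omega) (by omega) (by omega)
        hsize' hmem'
      simpa [Nat.add_sub_cancel] using this
    · have hieq : i = pvOrd N M := by omega
      have hmem0 : pvF N M i ∈ s := by
        rw [hmem]
        exact ⟨0, by omega, by rw [hieq, pvF_ord N M hN, pvF_zero]⟩
      have hsize' : (s.insert (pvF N M i)).size = i := by
        rw [Std.HashSet.size_insert, if_pos hmem0, hsize]
      obtain ⟨f', rfl⟩ : ∃ f', f = f' + 1 := ⟨f - 1, by omega⟩
      rw [solutionLoop, if_neg (by rw [hsize']; omega)]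
      rw [hsize', hieq]

theorem euclid_eq : ∀ (fuel n m : Nat), m < fuel →
    euclidLoop fuel (n : Int) (m : Int) = (Nat.gcd n m : Int) := by
  intro fuel
  induction fuel with
  | zero => intro n m hm; omega
  | succ f ih =>
    intro n m hm
    rw [euclidLoop]
    rcases Nat.eq_zero_or_pos m with h0 | h0
    · subst h0; simp
    · rw [if_pos (by exact_mod_cast h0.ne'), PySem.Int.mod_natCast,
        ih m (n % m) (by have := Nat.mod_lt n h0; omega)]
      rw [Nat.gcd_comm m (n % m), ← Nat.gcd_rec, Nat.gcd_comm]

theorem solution_alt_eq (N M : Int) (hN : N ≠ 0) :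
    solution_alt N M = (pvOrd N M : Int) := by
  unfold solution_alt
  rw [Int.abs_eq_natAbs N, Int.abs_eq_natAbs M, euclid_eq (M.natAbs + 1) N.natAbs M.natAbs (by omega),
    PySem.Int.floordiv_natCast]
  rfl

-- ===== VERDICT (by name: the statement is the Claim_ definition above) =====
theorem solution_spec : Claim_equal_solution := by
  intro N M hdom hpre
  have hN : N ≠ 0 := hpre
  unfold Spec_solution solution
  have hsize0 : ((∅ : Std.HashSet Int).insert 0).size = 1 := by
    rw [Std.HashSet.size_insert, if_neg (Std.HashSet.not_mem_empty), Std.HashSet.size_empty]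
  have hmem0 : ∀ x, x ∈ (∅ : Std.HashSet Int).insert 0 ↔ ∃ j, j < 1 ∧ pvF N M j = x := by
    intro x
    rw [Std.HashSet.mem_insert, beq_iff_eq]
    simp only [Std.HashSet.not_mem_empty, or_false]
    constructor
    · rintro rfl; exact ⟨0, by omega, pvF_zero N M⟩
    · rintro ⟨j, hj, hje⟩
      rw [show j = 0 from by omega, pvF_zero N M] at hje
      exact hje
  rw [show (1 : Int) = ((1 : Nat) : Int) from by norm_num]
  rw [show (0 : Int) = pvF N M (1 - 1) from (pvF_zero N M).symm]
  rw [show ((∅ : Std.HashSet Int).insert (pvF N M (1 - 1))) = (∅ : Std.HashSet Int).insert 0 from by rw [show pvF N M (1 - 1) = 0 from pvF_zero N M]]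
  rw [pvLoop_key N M hN (N.natAbs + 2) 1 _ le_rfl (pvOrd_pos N M hN)
    (by have := pvOrd_le N M; omega) hsize0 hmem0]
  rw [solution_alt_eq N M hN]
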